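-- pv_equiv track=rewrite | github.com/vecyang1/macos-display-rotator | screen_rotator.py | order_shortcut_keys
-- ===== SOURCE A (Python) =====
-- from typing import Dict, List, Optional, Sequence, Union
--
-- MODIFIER_ORDER = ("ctrl", "shift", "alt", "cmd")
--
-- def order_shortcut_keys(keys: Sequence[str]) -> List[str]:
--     normalized: List[str] = []
--     seen = set()
--     for key in keys:
--         normalized_key = str(key).strip().lower()
--         if not normalized_key or normalized_key in seen:
--             continue
--         seen.add(normalized_key)
--         normalized.append(normalized_key)
--
--     modifiers = [key for key in MODIFIER_ORDER if key in normalized]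
--     non_modifiers = [key for key in normalized if key not in MODIFIER_ORDER]
--     return modifiers + non_modifiers
-- ===== SOURCE B (Python) =====
-- from typing import List, Sequence
--
-- MODIFIER_ORDER = ("ctrl", "shift", "alt", "cmd")
--
-- _RANK = {key: rank for rank, key in enumerate(MODIFIER_ORDER)}
--
--
-- def order_shortcut_keys(keys: Sequence[str]) -> List[str]:
--     normalized = list(dict.fromkeys(
--         k for k in (str(key).strip().lower() for key in keys) if k))
--     return sorted(normalized, key=lambda k: _RANK.get(k, len(MODIFIER_ORDER)))
-- ===== Notes on version B (the rewrite author's own statement) =====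
-- stated objective: simpler
-- what changed: Replaces the explicit seen-set loop plus two-list partition-and-concatenate with dict.fromkeys dedup over a normalizing generator followed by one stable sort keyed on the modifier's fixed rank (non-modifiers share the maximal rank, so stability preserves their order).
import Mathlib
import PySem

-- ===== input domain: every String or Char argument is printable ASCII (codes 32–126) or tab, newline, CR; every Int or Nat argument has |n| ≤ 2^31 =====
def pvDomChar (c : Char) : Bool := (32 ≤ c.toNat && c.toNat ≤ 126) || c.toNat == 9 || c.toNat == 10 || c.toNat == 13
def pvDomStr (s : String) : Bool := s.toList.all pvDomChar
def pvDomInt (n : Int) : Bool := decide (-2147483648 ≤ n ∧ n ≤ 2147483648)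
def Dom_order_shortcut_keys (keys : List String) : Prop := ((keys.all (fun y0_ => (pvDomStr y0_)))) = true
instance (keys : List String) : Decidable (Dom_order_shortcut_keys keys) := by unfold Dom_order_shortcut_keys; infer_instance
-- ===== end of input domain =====

-- B replaces A's explicit seen-set loop and two-list partition with dict.fromkeys dedup
-- plus one stable sort keyed by modifier rank (objective: simpler).

-- MODIFIER_ORDER = ("ctrl", "shift", "alt", "cmd")
def MODIFIER_ORDER : List String := ["ctrl", "shift", "alt", "cmd"]

-- ===== PORT A =====
def order_shortcut_keys (keys : List String) : List String :=
  -- for key in keys: normalized_key = str(key).strip().lower(); skip empty/seen; else append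
  let st := keys.foldl
    (fun (st : List String × PySem.Set String) key =>
      let nk := PySem.Str.lower (PySem.Str.strip key)
      if nk = "" ∨ st.2.contains nk then st
      else (st.1 ++ [nk], st.2.add nk))
    ([], PySem.Set.empty)
  let normalized := st.1
  let modifiers := MODIFIER_ORDER.filter (fun k => normalized.contains k)
  let non_modifiers := normalized.filter (fun k => ¬ MODIFIER_ORDER.contains k)
  modifiers ++ non_modifiers

-- ===== PORT B =====
-- _RANK = {key: rank for rank, key in enumerate(MODIFIER_ORDER)}
def pvRankDict : PySem.Dict String Int :=
  (PySem.List.enumerate MODIFIER_ORDER 0).foldl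
    (fun d p => d.insert p.2 p.1) PySem.Dict.empty

def order_shortcut_keys_alt (keys : List String) : List String :=
  -- normalized = list(dict.fromkeys(k for k in (str(key).strip().lower() for key in keys) if k))
  let normalized := PySem.List.dedup
    ((keys.map (fun key => PySem.Str.lower (PySem.Str.strip key))).filter (fun k => k ≠ ""))
  -- sorted(normalized, key=lambda k: _RANK.get(k, len(MODIFIER_ORDER)))
  PySem.List.sorted normalized (fun k => PySem.Dict.getD pvRankDict k 4) false

-- ===== PRECONDITION & SPEC =====
def Spec_order_shortcut_keys (keys : List String) (out : List String) : Prop := out = order_shortcut_keys_alt keys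
instance (keys : List String) (out : List String) : Decidable (Spec_order_shortcut_keys keys out) := by unfold Spec_order_shortcut_keys; infer_instance

-- ===== CLAIM (what is proved, stated in full; the proofs are below) =====
def Claim_equal_order_shortcut_keys : Prop := ∀ (keys : List String), Dom_order_shortcut_keys keys → Spec_order_shortcut_keys keys (order_shortcut_keys keys)

-- ===== LEMMAS AND PROOFS =====

-- the sort key of B, as a named function
def pvRank (k : String) : Int := PySem.Dict.getD pvRankDict k 4

theorem pvRank_eq (k : String) :
    pvRank k = (if k = "ctrl" then 0 else if k = "shift" then 1 else
      if k = "alt" then 2 else if k = "cmd" then 3 else 4) := by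
  by_cases h1 : k = "ctrl"
  · subst h1; decide
  by_cases h2 : k = "shift"
  · subst h2; decide
  by_cases h3 : k = "alt"
  · subst h3; decide
  by_cases h4 : k = "cmd"
  · subst h4; decide
  have e1 : (("ctrl" : String) == k) = false := beq_eq_false_iff_ne.mpr (Ne.symm h1)
  have e2 : (("shift" : String) == k) = false := beq_eq_false_iff_ne.mpr (Ne.symm h2)
  have e3 : (("alt" : String) == k) = false := beq_eq_false_iff_ne.mpr (Ne.symm h3)
  have e4 : (("cmd" : String) == k) = false := beq_eq_false_iff_ne.mpr (Ne.symm h4)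
  simp [pvRank, pvRankDict, MODIFIER_ORDER, PySem.List.enumerate, PySem.Dict.empty,
    PySem.Dict.insert, PySem.Dict.getD, PySem.Dict.get?, List.find?,
    e1, e2, e3, e4, h1, h2, h3, h4]

theorem pvRank_le (k : String) : pvRank k ≤ 4 := by
  rw [pvRank_eq]; split_ifs <;> norm_num

theorem pvRank_nonmod {k : String} (h : MODIFIER_ORDER.contains k = false) : pvRank k = 4 := by
  simp only [ MODIFIER_ORDER, List.contains_cons, Bool.or_eq_false_iff, beq_eq_false_iff_ne,
    ne_eq, List.contains_nil] at h
  obtain ⟨a1, a2, a3, a4, -⟩ := h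
  rw [pvRank_eq, if_neg a1, if_neg a2, if_neg a3, if_neg a4]

-- A's paired (normalized, seen) loop collapses to a single set-building fold
theorem foldl_pair_diag {α β : Type} (F : β × β → α → β × β) (g : β → α → β)
    (h : ∀ b x, F (b, b) x = (g b x, g b x)) (keys : List α) (s : β) :
    keys.foldl F (s, s) = (keys.foldl g s, keys.foldl g s) := by
  induction keys generalizing s with
  | nil => rfl
  | cons x rest ih => simp only [List.foldl_cons]; rw [h]; exact ih _

-- insertion into low ++ high when x belongs exactly between them
theorem insertBy_split {α : Type} (before : α → α → Bool) (x : α) (low high : List α)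
    (hl : ∀ y ∈ low, before x y = false) (hh : ∀ y ∈ high, before x y = true) :
    PySem.List.insertBy before x (low ++ high) = low ++ x :: high := by
  induction low with
  | nil =>
    cases high with
    | nil => rfl
    | cons h t => simp [PySem.List.insertBy, hh h (by simp)]
  | cons l low' ih =>
    have hbl : before x l = false := hl l (by simp)
    simp only [List.cons_append, PySem.List.insertBy, hbl, Bool.false_eq_true, if_false,
      List.cons.injEq, true_and]
    exact ih (fun y hy => hl y (by simp [hy]))

theorem mem_if_singleton {c : Prop} [Decidable c] {m y : String}
    (h : y ∈ (if c then [m] else [])) : y = m := by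
  split at h <;> simp_all

-- the modifier filter over the literal MODIFIER_ORDER, bucket by bucket
theorem filter_mods (n : List String) :
    MODIFIER_ORDER.filter (fun k => n.contains k) =
      (if n.contains "ctrl" = true then ["ctrl"] else []) ++
      ((if n.contains "shift" = true then ["shift"] else []) ++
      ((if n.contains "alt" = true then ["alt"] else []) ++
      (if n.contains "cmd" = true then ["cmd"] else []))) := by
  simp only [ MODIFIER_ORDER, List.filter]
  split_ifs <;> simp_all

-- main: a stable sort on ranks equals A's modifiers ++ non_modifiers partition
theorem sorted_eq_partition (n : List String) (hn : n.Nodup) :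
    PySem.List.sorted n pvRank false =
      MODIFIER_ORDER.filter (fun k => n.contains k) ++
        n.filter (fun k => ¬ MODIFIER_ORDER.contains k) := by
  induction n using List.reverseRecOn with
  | nil => simp [PySem.List.sorted, MODIFIER_ORDER]
  | append_singleton n x ih =>
    rw [List.nodup_append] at hn
    have hx : x ∉ n := by
      intro hmem
      exact hn.2.2 x hmem x (by simp) rfl
    have hn' : n.Nodup := hn.1
    have ihn := ih hn'
    have hsnoc : PySem.List.sorted (n ++ [x]) pvRank false =
        PySem.List.insertBy (fun a b => decide (pvRank a < pvRank b)) x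
          (PySem.List.sorted n pvRank false) := by
      rw [PySem.List.sorted_eq_foldl_insertBy, PySem.List.sorted_eq_foldl_insertBy,
        List.foldl_append]
      rfl
    have hnonmod_mem : ∀ y ∈ n.filter (fun k => ¬ MODIFIER_ORDER.contains k),
        pvRank y = 4 := by
      intro y hy
      have := (List.mem_filter.mp hy).2
      simp only [decide_eq_true_eq] at this
      exact pvRank_nonmod (Bool.not_eq_true _ ▸ eq_false_of_ne_true this)
    have hxn : n.contains x = false := by simp [hx]
    by_cases hxm : MODIFIER_ORDER.contains x = true
    · -- x is one of the four modifiers; it was not yet in n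
      have hxmem : x ∈ MODIFIER_ORDER := by simpa using hxm
      have hmem_snoc : ∀ m : String, m ≠ x → ((n ++ [x]).contains m) = n.contains m := by
        intro m hm
        simp [hm]
      have hfilter_snoc : (n ++ [x]).filter (fun k => ¬ MODIFIER_ORDER.contains k) =
          n.filter (fun k => ¬ MODIFIER_ORDER.contains k) := by
        rw [List.filter_append]
        simp [hxmem]
      rw [hsnoc, ihn, filter_mods, filter_mods, hfilter_snoc]
      have hxmem' := hxmem
      simp only [ MODIFIER_ORDER, List.mem_cons, List.not_mem_nil, or_false] at hxmem'
      rcases hxmem' with h | h | h | h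
      · -- x = "ctrl"
        subst h
        rw [show (n ++ ["ctrl"]).contains "ctrl" = true by simp,
          hmem_snoc "shift" (by decide), hmem_snoc "alt" (by decide),
          hmem_snoc "cmd" (by decide), hxn]
        have hh : ∀ y ∈ (if n.contains "shift" = true then ["shift"] else []) ++
            ((if n.contains "alt" = true then ["alt"] else []) ++
            ((if n.contains "cmd" = true then ["cmd"] else []) ++
            n.filter (fun k => ¬ MODIFIER_ORDER.contains k))),
            (decide (pvRank "ctrl" < pvRank y)) = true := by
          intro y hy
          have h4 : pvRank y = 1 ∨ pvRank y = 2 ∨ pvRank y = 3 ∨ pvRank y = 4 := by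
            rcases List.mem_append.mp hy with hy | hy
            · left; rw [mem_if_singleton hy]; decide
            rcases List.mem_append.mp hy with hy | hy
            · right; left; rw [mem_if_singleton hy]; decide
            rcases List.mem_append.mp hy with hy | hy
            · right; right; left; rw [mem_if_singleton hy]; decide
            · right; right; right; exact hnonmod_mem y hy
          have h0 : pvRank "ctrl" = 0 := by decide
          rcases h4 with h4 | h4 | h4 | h4 <;> simp [h0, h4]
        have hkey := insertBy_split (fun a b => decide (pvRank a < pvRank b)) "ctrl" [] _ (fun y hy => by simp at hy) hh
        simpa using hkey
      · -- x = "shift"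
        subst h
        rw [show (n ++ ["shift"]).contains "shift" = true by simp,
          hmem_snoc "ctrl" (by decide), hmem_snoc "alt" (by decide),
          hmem_snoc "cmd" (by decide), hxn]
        have hl : ∀ y ∈ (if n.contains "ctrl" = true then ["ctrl"] else []),
            (decide (pvRank "shift" < pvRank y)) = false := by
          intro y hy
          rw [mem_if_singleton hy]; decide
        have hh : ∀ y ∈ (if n.contains "alt" = true then ["alt"] else []) ++
            ((if n.contains "cmd" = true then ["cmd"] else []) ++
            n.filter (fun k => ¬ MODIFIER_ORDER.contains k)),
            (decide (pvRank "shift" < pvRank y)) = true := by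
          intro y hy
          have h4 : pvRank y = 2 ∨ pvRank y = 3 ∨ pvRank y = 4 := by
            rcases List.mem_append.mp hy with hy | hy
            · left; rw [mem_if_singleton hy]; decide
            rcases List.mem_append.mp hy with hy | hy
            · right; left; rw [mem_if_singleton hy]; decide
            · right; right; exact hnonmod_mem y hy
          have h0 : pvRank "shift" = 1 := by decide
          rcases h4 with h4 | h4 | h4 <;> simp [h0, h4]
        have hkey := insertBy_split (fun a b => decide (pvRank a < pvRank b)) "shift" _ _ hl hh
        simpa using hkey
      · -- x = "alt"
        subst h
        rw [show (n ++ ["alt"]).contains "alt" = true by simp,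
          hmem_snoc "ctrl" (by decide), hmem_snoc "shift" (by decide),
          hmem_snoc "cmd" (by decide), hxn]
        have hl : ∀ y ∈ (if n.contains "ctrl" = true then ["ctrl"] else []) ++
            (if n.contains "shift" = true then ["shift"] else []),
            (decide (pvRank "alt" < pvRank y)) = false := by
          intro y hy
          rcases List.mem_append.mp hy with hy | hy <;> rw [mem_if_singleton hy] <;> decide
        have hh : ∀ y ∈ (if n.contains "cmd" = true then ["cmd"] else []) ++
            n.filter (fun k => ¬ MODIFIER_ORDER.contains k),
            (decide (pvRank "alt" < pvRank y)) = true := by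
          intro y hy
          have h4 : pvRank y = 3 ∨ pvRank y = 4 := by
            rcases List.mem_append.mp hy with hy | hy
            · left; rw [mem_if_singleton hy]; decide
            · right; exact hnonmod_mem y hy
          have h0 : pvRank "alt" = 2 := by decide
          rcases h4 with h4 | h4 <;> simp [h0, h4]
        have hkey := insertBy_split (fun a b => decide (pvRank a < pvRank b)) "alt" _ _ hl hh
        simpa using hkey
      · -- x = "cmd"
        subst h
        rw [show (n ++ ["cmd"]).contains "cmd" = true by simp,
          hmem_snoc "ctrl" (by decide), hmem_snoc "shift" (by decide),
          hmem_snoc "alt" (by decide), hxn]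
        have hl : ∀ y ∈ (if n.contains "ctrl" = true then ["ctrl"] else []) ++
            ((if n.contains "shift" = true then ["shift"] else []) ++
            (if n.contains "alt" = true then ["alt"] else [])),
            (decide (pvRank "cmd" < pvRank y)) = false := by
          intro y hy
          rcases List.mem_append.mp hy with hy | hy
          · rw [mem_if_singleton hy]; decide
          rcases List.mem_append.mp hy with hy | hy <;> rw [mem_if_singleton hy] <;> decide
        have hh : ∀ y ∈ n.filter (fun k => ¬ MODIFIER_ORDER.contains k),
            (decide (pvRank "cmd" < pvRank y)) = true := by
          intro y hy
          have h4 : pvRank y = 4 := hnonmod_mem y hy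
          simp [h4, show pvRank "cmd" = 3 by decide]
        have hkey := insertBy_split (fun a b => decide (pvRank a < pvRank b)) "cmd" _ _ hl hh
        simpa using hkey
    · -- x is not a modifier: it goes to the very end
      have hxm' : MODIFIER_ORDER.contains x = false := eq_false_of_ne_true hxm
      have hxnm : x ∉ MODIFIER_ORDER := by simpa using hxm'
      have hrx : pvRank x = 4 := pvRank_nonmod hxm'
      have hmods_snoc : MODIFIER_ORDER.filter (fun k => (n ++ [x]).contains k) =
          MODIFIER_ORDER.filter (fun k => n.contains k) := by
        apply List.filter_congr
        intro m hm
        have hmx : m ≠ x := by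
          intro h; subst h; exact hxnm hm
        simp [hmx]
      have hfilter_snoc : (n ++ [x]).filter (fun k => ¬ MODIFIER_ORDER.contains k) =
          n.filter (fun k => ¬ MODIFIER_ORDER.contains k) ++ [x] := by
        rw [List.filter_append]
        simp [hxnm]
      rw [hsnoc, ihn, hmods_snoc, hfilter_snoc]
      have hl : ∀ y ∈ MODIFIER_ORDER.filter (fun k => n.contains k) ++
          n.filter (fun k => ¬ MODIFIER_ORDER.contains k),
          (decide (pvRank x < pvRank y)) = false := by
        intro y _
        simp only [hrx, decide_eq_false_iff_not, not_lt]
        exact pvRank_le y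
      have hkey := insertBy_split (fun a b => decide (pvRank a < pvRank b)) x _ [] hl (fun y hy => by simp at hy)
      simpa using hkey

-- ===== VERDICT (by name: the statement is the Claim_ definition above) =====
theorem order_shortcut_keys_spec : Claim_equal_order_shortcut_keys := by
  intro keys _
  unfold Spec_order_shortcut_keys order_shortcut_keys order_shortcut_keys_alt
  have hdiag := foldl_pair_diag
    (fun (st : List String × PySem.Set String) key =>
      let nk := PySem.Str.lower (PySem.Str.strip key)
      if nk = "" ∨ st.2.contains nk then st
      else (st.1 ++ [nk], st.2.add nk))
    (fun (acc : PySem.Set String) key =>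
      let nk := PySem.Str.lower (PySem.Str.strip key)
      if nk = "" then acc else acc.add nk)
    (by
      intro b x
      by_cases h1 : PySem.Str.lower (PySem.Str.strip x) = ""
      · simp [h1]
      · by_cases h2 : PySem.Str.lower (PySem.Str.strip x) ∈ b
        · simp [h1, h2, PySem.Set.add]
        · simp [h1, h2, PySem.Set.add])
    keys PySem.Set.empty
  show (MODIFIER_ORDER.filter (fun k =>
      (List.foldl
        (fun (st : List String × PySem.Set String) key =>
          let nk := PySem.Str.lower (PySem.Str.strip key)
          if nk = "" ∨ st.2.contains nk then st
          else (st.1 ++ [nk], st.2.add nk))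
        (PySem.Set.empty, PySem.Set.empty) keys).1.contains k)) ++
      (List.foldl
        (fun (st : List String × PySem.Set String) key =>
          let nk := PySem.Str.lower (PySem.Str.strip key)
          if nk = "" ∨ st.2.contains nk then st
          else (st.1 ++ [nk], st.2.add nk))
        (PySem.Set.empty, PySem.Set.empty) keys).1.filter
          (fun k => ¬ MODIFIER_ORDER.contains k) =
      PySem.List.sorted
        (PySem.List.dedup
          ((keys.map (fun key => PySem.Str.lower (PySem.Str.strip key))).filter
            (fun k => k ≠ "")))
        (fun k => PySem.Dict.getD pvRankDict k 4) false
  rw [hdiag]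
  have hded : PySem.List.dedup
      ((keys.map (fun key => PySem.Str.lower (PySem.Str.strip key))).filter (fun k => k ≠ "")) =
      keys.foldl
        (fun (acc : PySem.Set String) key =>
          let nk := PySem.Str.lower (PySem.Str.strip key)
          if nk = "" then acc else acc.add nk) PySem.Set.empty := by
    rw [PySem.List.dedup, PySem.Set.ofList, List.foldl_filter, List.foldl_map]
    have hfun : (fun (x : PySem.Set String) (y : String) =>
        if (decide ¬(PySem.Str.lower (PySem.Str.strip y) = "")) = true
        then PySem.Set.add x (PySem.Str.lower (PySem.Str.strip y)) else x) =
        (fun (acc : PySem.Set String) key =>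
          let nk := PySem.Str.lower (PySem.Str.strip key)
          if nk = "" then acc else acc.add nk) := by
      funext acc key
      by_cases h : PySem.Str.lower (PySem.Str.strip key) = "" <;> simp [h]
    rw [hfun]
  have hnodup : (keys.foldl
      (fun (acc : PySem.Set String) key =>
        let nk := PySem.Str.lower (PySem.Str.strip key)
        if nk = "" then acc else acc.add nk) PySem.Set.empty).Nodup := by
    rw [← hded]
    exact PySem.List.nodup_dedup _
  rw [hded]
  exact (sorted_eq_partition _ hnodup).symm
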